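-- pv_equiv track=rewrite | github.com/yyytae0/algorithm-training | programmers/1-38.py | solution
-- ===== SOURCE A (Python) =====
-- def solution(n, arr1, arr2):
--     answer = []
--     lst = [[0 for _ in range(n)] for _ in range(n)]
--     for i in range(n):
--         dummy = ''
--         n1 = arr1[i]
--         nj = 1
--         while n1:
--             lst[i][-nj] += n1 % 2
--             n1 = n1//2
--             nj += 1
--         m1 = arr2[i]
--         mj = 1
--         while m1:
--             lst[i][-mj] += m1 % 2
--             m1 = m1 // 2
--             mj += 1
--         for j in lst[i]:
--             if j:
--                 dummy += '#'
--             else: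
--                 dummy += ' '
--         answer.append(dummy)
--     return answer
-- ===== SOURCE B (Python) =====
-- def solution(n, arr1, arr2):
--     answer = []
--     for i in range(n):
--         v = arr1[i] | arr2[i]
--         answer.append(''.join('#' if (v >> (n - 1 - j)) & 1 else ' ' for j in range(n)))
--     return answer
-- ===== Notes on version B (the rewrite author's own statement) =====
-- stated objective: simpler
-- what changed: Replaces the pre-built n-by-n integer grid and the two per-row repeated-division loops that add bits via negative indices with a direct per-row pass: OR the two numbers once and emit each of the n characters by testing bit n-1-j with a shift-and-mask.
import Mathlib
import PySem

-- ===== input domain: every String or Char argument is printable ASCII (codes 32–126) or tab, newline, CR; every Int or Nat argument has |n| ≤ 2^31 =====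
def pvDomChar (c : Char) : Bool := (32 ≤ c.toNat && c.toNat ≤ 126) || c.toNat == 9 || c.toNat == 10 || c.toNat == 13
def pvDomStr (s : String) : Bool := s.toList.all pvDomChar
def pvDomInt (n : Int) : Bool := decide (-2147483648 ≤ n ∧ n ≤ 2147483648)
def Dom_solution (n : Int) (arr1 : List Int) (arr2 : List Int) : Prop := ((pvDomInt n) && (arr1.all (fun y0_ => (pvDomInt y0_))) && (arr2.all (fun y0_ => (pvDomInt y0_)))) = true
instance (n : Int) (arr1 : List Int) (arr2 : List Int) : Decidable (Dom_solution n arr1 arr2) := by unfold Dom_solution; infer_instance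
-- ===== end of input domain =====

-- B replaces A's n×n integer grid and per-row repeated-division bit loops with a direct
-- shift-and-mask rendering of each row; equivalence is proved on Pre_ (where A returns).

-- ===== PORT A =====
-- lst[i][-nj] += v : add v at negative index -nj; out of range = IndexError in Python (outside Pre_), here a no-op
def pySetAddNeg (l : List Int) (nj : Int) (v : Int) : List Int :=
  let i : Int := -nj + l.length
  if 0 ≤ i ∧ i < l.length then l.set i.toNat (l.getD i.toNat 0 + v) else l

-- 'while n1: lst[-nj] += n1 % 2; n1 = n1 // 2; nj += 1' — Python diverges for n1 < 0 (outside Pre_); here we stop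
def whileBits (l : List Int) (v : Int) (nj : Int) : List Int :=
  if h : v ≤ 0 then l
  else whileBits (pySetAddNeg l nj (PySem.Int.mod v 2)) (PySem.Int.floordiv v 2) (nj + 1)
termination_by v.toNat
decreasing_by
  rw [PySem.Int.floordiv_eq_ediv_of_pos (by norm_num)]
  omega

def solution (n : Int) (arr1 : List Int) (arr2 : List Int) : List String :=
  let rng := PySem.List.pyRange 0 n 1
  let lst0 := rng.map (fun _ => rng.map (fun _ => (0 : Int)))
  let res := rng.foldl (fun (st : List String × List (List Int)) i =>
    let row := PySem.List.pyGetD st.2 i []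
    let row := whileBits row (PySem.List.pyGetD arr1 i 0) 1
    let row := whileBits row (PySem.List.pyGetD arr2 i 0) 1
    let dummy := row.foldl (fun d j => d ++ [if j ≠ 0 then '#' else ' ']) ([] : List Char)
    (st.1 ++ [String.mk dummy], PySem.List.pySetD st.2 i row)) (([] : List String), lst0)
  res.1

-- ===== PORT B =====
-- (v >> (n-1-j)) & 1 : shift amount n-1-j is ≥ 0 for j in range(n), so .toNat is exact here
def solution_alt (n : Int) (arr1 : List Int) (arr2 : List Int) : List String :=
  (PySem.List.pyRange 0 n 1).map (fun i =>
    let v := PySem.Int.bor (PySem.List.pyGetD arr1 i 0) (PySem.List.pyGetD arr2 i 0)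
    String.mk ((PySem.List.pyRange 0 n 1).map (fun j =>
      if PySem.Int.band (v >>> (n - 1 - j).toNat) 1 ≠ 0 then '#' else ' ')))

-- ===== PRECONDITION & SPEC =====
-- Pre_ excludes exactly the inputs on which A does not return: arr1/arr2 shorter than n
-- (IndexError), a value among the first n with more than n bits (IndexError on lst[i][-nj]),
-- or a negative value (the while loop never terminates).
def Pre_solution (n : Int) (arr1 : List Int) (arr2 : List Int) : Prop :=
  n ≤ arr1.length ∧ n ≤ arr2.length ∧
  ∀ v ∈ arr1.take n.toNat ++ arr2.take n.toNat, 0 ≤ v ∧ v < 2 ^ n.toNat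
instance (n : Int) (arr1 : List Int) (arr2 : List Int) : Decidable (Pre_solution n arr1 arr2) := by
  unfold Pre_solution; infer_instance

def pvWitness_solution : Int × List Int × List Int := (2, [1, 2], [3, 0])

def Spec_solution (n : Int) (arr1 : List Int) (arr2 : List Int) (out : List String) : Prop := out = solution_alt n arr1 arr2
instance (n : Int) (arr1 : List Int) (arr2 : List Int) (out : List String) : Decidable (Spec_solution n arr1 arr2 out) := by unfold Spec_solution; infer_instance

-- ===== CLAIM (what is proved, stated in full; the proofs are below) =====
def Claim_equal_solution : Prop := ∀ (n : Int) (arr1 : List Int) (arr2 : List Int), Dom_solution n arr1 arr2 → Pre_solution n arr1 arr2 → Spec_solution n arr1 arr2 (solution n arr1 arr2)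

-- ===== LEMMAS AND PROOFS =====

-- proof-only helpers
def zrow (n : Int) : List Int := (PySem.List.pyRange 0 n 1).map (fun _ => (0 : Int))
def chOf (x : Int) : Char := if x ≠ 0 then '#' else ' '
def rowOf (n a b : Int) : List Int := whileBits (whileBits (zrow n) a 1) b 1
def strOf (n a b : Int) : String := String.mk ((rowOf n a b).map chOf)

lemma foldl_chars : ∀ (l : List Int) (acc : List Char),
    l.foldl (fun d j => d ++ [if j ≠ 0 then '#' else ' ']) acc = acc ++ l.map chOf := by
  intro l
  induction l with
  | nil => simp
  | cons x xs ih => intro acc; rw [List.foldl_cons, ih]; simp [chOf]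

lemma pySetAddNeg_length (l : List Int) (nj v : Int) :
    (pySetAddNeg l nj v).length = l.length := by
  unfold pySetAddNeg
  simp only []
  split <;> simp

lemma whileBits_length : ∀ (l : List Int) (v nj : Int), (whileBits l v nj).length = l.length := by
  intro l v nj
  induction l, v, nj using whileBits.induct with
  | case1 l v nj h => rw [whileBits]; simp [h]
  | case2 l v nj h ih =>
      rw [whileBits]
      simp only [h, dite_false]
      rw [ih, pySetAddNeg_length]

lemma getD_set_self (l : List Int) (m : Nat) (x : Int) (h : m < l.length) :
    (l.set m x).getD m 0 = x := by
  simp [List.getD_eq_getElem?_getD, h]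

lemma getD_set_ne (l : List Int) (m k : Nat) (x : Int) (h : ¬ m = k) :
    (l.set m x).getD k 0 = l.getD k 0 := by
  simp [List.getD_eq_getElem?_getD, h]

lemma whileBits_getD (v : Nat) : ∀ (l : List Int) (nj : Nat), 1 ≤ nj →
    v < 2 ^ (l.length + 1 - nj) → ∀ k, k < l.length →
    (whileBits l (v : Int) (nj : Int)).getD k 0 =
      l.getD k 0 + (if k + nj ≤ l.length ∧ v.testBit (l.length - (k + nj)) then 1 else 0) := by
  induction v using Nat.strong_induction_on with
  | _ v ih =>
    intro l nj hnj hv k hk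
    by_cases h0 : v = 0
    · subst h0
      rw [whileBits]
      simp
    · have hvpos : 0 < v := Nat.pos_of_ne_zero h0
      have hle : nj ≤ l.length := by
        by_contra hgt
        rw [show l.length + 1 - nj = 0 from by omega] at hv
        simp at hv; omega
      rw [whileBits]
      rw [dif_neg (by omega)]
      have hm : PySem.Int.mod (v : Int) 2 = ((v % 2 : Nat) : Int) := by
        exact_mod_cast PySem.Int.mod_natCast v 2
      have hd : PySem.Int.floordiv (v : Int) 2 = ((v / 2 : Nat) : Int) := by
        exact_mod_cast PySem.Int.floordiv_natCast v 2
      have hset : pySetAddNeg l (nj : Int) ((v % 2 : Nat) : Int) =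
          l.set (l.length - nj) (l.getD (l.length - nj) 0 + ((v % 2 : Nat) : Int)) := by
        unfold pySetAddNeg
        simp only []
        rw [if_pos (by constructor <;> [omega; omega])]
        rw [show ((-(nj : Int) + l.length).toNat) = l.length - nj from by omega]
      rw [hm, hd, hset]
      have hcast : ((nj : Int) + 1) = (((nj + 1 : Nat)) : Int) := by push_cast; ring
      rw [hcast]
      have hv2 : v / 2 < 2 ^ ((l.set (l.length - nj)
          (l.getD (l.length - nj) 0 + ((v % 2 : Nat) : Int))).length + 1 - (nj + 1)) := by
        rw [List.length_set]
        rw [show l.length + 1 - nj = (l.length - nj) + 1 from by omega, pow_succ] at hv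
        have : l.length + 1 - (nj + 1) = l.length - nj := by omega
        rw [this]; omega
      rw [ih (v / 2) (by omega) _ (nj + 1) (by omega) hv2 k (by rw [List.length_set]; exact hk)]
      rw [List.length_set]
      by_cases hkm : k = l.length - nj
      · subst hkm
        rw [getD_set_self l _ _ (by omega)]
        rw [if_neg (by omega)]
        rw [show l.length - (l.length - nj + nj) = 0 from by omega, Nat.testBit_zero]
        rcases Nat.mod_two_eq_zero_or_one v with hp | hp <;>
          simp [hp, show l.length - nj + nj ≤ l.length from by omega]
      · rw [getD_set_ne l _ _ _ (fun h => hkm h.symm)]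
        by_cases hin : k + nj ≤ l.length
        · have hlt : k + nj < l.length := by omega
          rw [show l.length - (k + nj) = (l.length - (k + (nj + 1))) + 1 from by omega,
              Nat.testBit_add_one]
          simp [show k + (nj + 1) ≤ l.length from by omega, hin]
        · rw [if_neg (by omega), if_neg (by omega)]

lemma zrow_length (n : Int) : (zrow n).length = n.toNat := by
  simp [zrow, PySem.List.length_pyRange_one]

lemma zrow_getD (n : Int) (k : Nat) : (zrow n).getD k 0 = 0 := by
  simp only [zrow, List.getD_eq_getElem?_getD, List.getElem?_map]
  cases (PySem.List.pyRange 0 n 1)[k]? <;> simp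

lemma rowOf_getD (n : Int) (a b : Nat) (ha : a < 2 ^ n.toNat) (hb : b < 2 ^ n.toNat)
    (k : Nat) (hk : k < n.toNat) :
    (rowOf n (a : Int) (b : Int)).getD k 0 =
      (if a.testBit (n.toNat - (k + 1)) then 1 else 0) +
      (if b.testBit (n.toNat - (k + 1)) then 1 else 0) := by
  have L := zrow_length n
  have h1 : (1 : Int) = ((1 : Nat) : Int) := rfl
  unfold rowOf
  rw [h1]
  rw [whileBits_getD b _ 1 (le_refl 1)
      (by rw [whileBits_length, L]; simpa using hb)
      k (by rw [whileBits_length, L]; exact hk)]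
  rw [whileBits_getD a _ 1 (le_refl 1) (by rw [L]; simpa using ha) k (by rw [L]; exact hk)]
  rw [whileBits_length, L, zrow_getD]
  simp [show k + 1 ≤ n.toNat from by omega]

lemma rowEq (n : Int) (a b : Int) (ha0 : 0 ≤ a) (hb0 : 0 ≤ b)
    (ha : a < 2 ^ n.toNat) (hb : b < 2 ^ n.toNat) :
    (rowOf n a b).map chOf = (PySem.List.pyRange 0 n 1).map (fun j =>
      if PySem.Int.band (PySem.Int.bor a b >>> (n - 1 - j).toNat) 1 ≠ 0 then '#' else ' ') := by
  obtain ⟨a', rfl⟩ := Int.eq_ofNat_of_zero_le ha0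
  obtain ⟨b', rfl⟩ := Int.eq_ofNat_of_zero_le hb0
  have hlr : (rowOf n (a' : Int) (b' : Int)).length = n.toNat := by
    unfold rowOf; rw [whileBits_length, whileBits_length, zrow_length]
  apply List.ext_getElem
  · rw [List.length_map, List.length_map, hlr, PySem.List.length_pyRange_one]
    simp
  · intro k h1 h2
    rw [List.getElem_map, List.getElem_map]
    have hk : k < n.toNat := by rwa [List.length_map, hlr] at h1
    have hg : (rowOf n (a' : Int) (b' : Int))[k]'(by rwa [hlr]) =
        (rowOf n (a' : Int) (b' : Int)).getD k 0 := by
      rw [List.getD_eq_getElem _ _ (by rwa [hlr])]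
    rw [hg, rowOf_getD n a' b' (by exact_mod_cast ha) (by exact_mod_cast hb) k hk,
        PySem.List.getElem_pyRange_one]
    have hidx : ((n - 1 - (0 + (k : Int))).toNat) = n.toNat - (k + 1) := by omega
    rw [hidx]
    have hbor : PySem.Int.bor ((a' : Nat) : Int) ((b' : Nat) : Int) =
        (((a' ||| b' : Nat)) : Int) := by
      simp [PySem.Int.bor]
    rw [hbor]
    have hshift : (((a' ||| b' : Nat) : Int) >>> (n.toNat - (k + 1))) =
        (((a' ||| b') >>> (n.toNat - (k + 1)) : Nat) : Int) := by simp
    rw [hshift, PySem.Int.band_one]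
    have hm : PySem.Int.mod ((((a' ||| b') >>> (n.toNat - (k + 1)) : Nat)) : Int) 2 =
        ((((a' ||| b') >>> (n.toNat - (k + 1)) % 2 : Nat)) : Int) := by
      exact_mod_cast PySem.Int.mod_natCast _ 2
    rw [hm]
    have hor : ((a' ||| b') >>> (n.toNat - (k + 1))) % 2 = 1 ↔
        (a' ||| b').testBit (n.toNat - (k + 1)) = true := by
      rw [Nat.testBit_eq_decide_div_mod_eq, Nat.shiftRight_eq_div_pow]; simp
    have hcond : ((((a' ||| b') >>> (n.toNat - (k + 1)) % 2 : Nat)) : Int) ≠ 0 ↔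
        (a' ||| b').testBit (n.toNat - (k + 1)) = true := by
      rw [← hor]; omega
    rw [if_congr hcond rfl rfl]
    cases hta : a'.testBit (n.toNat - (k + 1)) <;> cases htb : b'.testBit (n.toNat - (k + 1)) <;>
      simp [chOf, hta, htb, Nat.testBit_or]

lemma pyGetD_pySetD_ne {α : Type} (lst : List α) (i i' : Int) (row : α) (d : α)
    (hi' : 0 ≤ i') (hne : i ≠ i') (hi : 0 ≤ i) :
    PySem.List.pyGetD (PySem.List.pySetD lst i row) i' d = PySem.List.pyGetD lst i' d := by
  unfold PySem.List.pySetD PySem.List.pySet? PySem.List.pyGetD PySem.List.pyGet? PySem.List.pyIdx?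
  by_cases hlen : i < (lst.length : Int)
  · simp only [hi, hi', if_pos, hlen, Option.map_some]
    simp only [Option.getD_some, List.length_set]
    have hne' : ¬ (i.toNat = i'.toNat) := by omega
    by_cases h2 : i' < (lst.length : Int)
    · simp [h2, List.getElem?_set, hne']
    · simp [h2]
  · simp [hi, hi', hlen]

lemma foldA (n : Int) (arr1 arr2 : List Int) :
    ∀ (idxs : List Int) (ans : List String) (lst : List (List Int)),
    idxs.Nodup → (∀ i ∈ idxs, 0 ≤ i ∧ PySem.List.pyGetD lst i [] = zrow n) →
    (idxs.foldl (fun (st : List String × List (List Int)) i =>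
      let row := PySem.List.pyGetD st.2 i []
      let row := whileBits row (PySem.List.pyGetD arr1 i 0) 1
      let row := whileBits row (PySem.List.pyGetD arr2 i 0) 1
      let dummy := row.foldl (fun d j => d ++ [if j ≠ 0 then '#' else ' ']) ([] : List Char)
      (st.1 ++ [String.mk dummy], PySem.List.pySetD st.2 i row)) (ans, lst)).1
    = ans ++ idxs.map (fun i =>
        strOf n (PySem.List.pyGetD arr1 i 0) (PySem.List.pyGetD arr2 i 0)) := by
  intro idxs
  induction idxs with
  | nil => intro ans lst _ _; simp
  | cons i rest ih =>
    intro ans lst hnd hinv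
    have hi := hinv i List.mem_cons_self
    rw [List.foldl_cons]
    simp only [hi.2, foldl_chars, List.nil_append]
    simp only [foldl_chars, List.nil_append] at ih
    rw [ih _ _ (List.nodup_cons.mp hnd).2 ?inv]
    case inv =>
      intro i' hi'
      have h' := hinv i' (List.mem_cons_of_mem _ hi')
      refine ⟨h'.1, ?_⟩
      rw [pyGetD_pySetD_ne lst i i' _ _ h'.1
          (fun h => (List.nodup_cons.mp hnd).1 (h ▸ hi')) hi.1]
      exact h'.2
    simp [strOf, rowOf]

-- ===== VERDICT (by name: the statement is the Claim_ definition above) =====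
lemma take_elem_mem (l : List Int) (n : Int) (i : Int) (hi0 : 0 ≤ i) (hin : i < n)
    (hlen : n ≤ (l.length : Int)) :
    PySem.List.pyGetD l i 0 ∈ l.take n.toNat := by
  rw [PySem.List.pyGetD_of_nonneg l 0 hi0]
  have h1 : i.toNat < l.length := by omega
  have h2 : i.toNat < (l.take n.toNat).length := by simp [List.length_take]; omega
  rw [List.getD_eq_getElem l 0 h1]
  have : l[i.toNat]'h1 = (l.take n.toNat)[i.toNat]'h2 := by
    rw [List.getElem_take]
  rw [this]
  exact List.getElem_mem h2

theorem solution_spec : Claim_equal_solution := by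
  intro n arr1 arr2 _hdom hpre
  unfold Spec_solution solution solution_alt
  dsimp only
  obtain ⟨h1, h2, h3⟩ := hpre
  rw [foldA n arr1 arr2 _ [] _ (PySem.List.nodup_pyRange_one 0 n) ?inv]
  case inv =>
    intro i hi
    have hm := PySem.List.mem_pyRange_one.mp hi
    exact ⟨hm.1, PySem.List.pyGetD_map_pyRange_of_nonneg _ n i [] hm.1 hm.2⟩
  rw [List.nil_append]
  apply List.map_congr_left
  intro i hi
  have hm := PySem.List.mem_pyRange_one.mp hi
  have ha := h3 _ (List.mem_append.mpr (Or.inl (take_elem_mem arr1 n i hm.1 hm.2 h1)))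
  have hb := h3 _ (List.mem_append.mpr (Or.inr (take_elem_mem arr2 n i hm.1 hm.2 h2)))
  unfold strOf
  rw [rowEq n _ _ ha.1 hb.1 ha.2 hb.2]
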